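-- pv_equiv track=rewrite | github.com/kimmonsruikka/profitlyworkflow | ingestion/edgar/filing_parser.py | extract_underwriter
-- ===== SOURCE A (Python) =====
-- from typing import Iterable
--
-- def extract_underwriter(
--     text: str, known_names: Iterable[str]
-- ) -> str | None:
--     """Return the first known underwriter name found in the text, else None.
--
--     String-match by case-insensitive substring against the supplied names.
--     Caller is responsible for pulling the `underwriters` table contents.
--     """
--     if not text or not known_names:
--         return None
--     lower = text.lower()
--     for name in known_names:
--         if not name:
--             continue
--         if name.strip().lower() in lower:
--             return name
--     return None
-- ===== SOURCE B (Python) =====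
-- def extract_underwriter(text, known_names):
--     """Single left-to-right scan over the text collecting which of the distinct
--     patterns occur, then pick the first name in known_names order whose pattern
--     was seen."""
--     if not text or not known_names:
--         return None
--     lower = text.lower()
--     pats = [(name, name.strip().lower()) for name in known_names if name]
--     if not pats:
--         return None
--     distinct = list(dict.fromkeys(p for name, p in pats))
--     found = set()
--     for i in range(len(lower)):
--         for p in distinct:
--             if p not in found and lower.startswith(p, i):
--                 found.add(p)
--     for name, p in pats:
--         if p in found:
--             return name
--     return None
-- ===== Notes on version B (the rewrite author's own statement) =====
-- stated objective: alternative
-- what changed: A scans the lowered text once per name with a substring test; B makes a single left-to-right scan over the text positions collecting the set of patterns that occur, then picks the first name in known_names order whose pattern was seen.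
import Mathlib
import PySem

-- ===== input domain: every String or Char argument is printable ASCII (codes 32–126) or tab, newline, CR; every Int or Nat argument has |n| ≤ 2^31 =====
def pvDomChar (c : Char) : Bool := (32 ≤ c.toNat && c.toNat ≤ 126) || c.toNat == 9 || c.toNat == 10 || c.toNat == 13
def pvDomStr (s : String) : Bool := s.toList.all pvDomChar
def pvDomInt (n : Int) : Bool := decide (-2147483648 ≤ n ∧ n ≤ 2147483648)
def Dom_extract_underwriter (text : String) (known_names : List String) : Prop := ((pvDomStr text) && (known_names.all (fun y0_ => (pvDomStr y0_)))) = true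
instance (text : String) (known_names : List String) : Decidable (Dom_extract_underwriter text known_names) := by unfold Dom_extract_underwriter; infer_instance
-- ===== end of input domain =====

-- B replaces A's per-name substring scans by one left-to-right scan of the text that collects
-- the set of occurring patterns, then picks the first name in known_names order (objective: alternative).

-- ===== PORT A =====
-- the 'for name in known_names' loop of A
def pvAGo (lower : String) : List String → Option String
  | [] => none
  | name :: rest =>
    if name = "" then pvAGo lower rest
    else if PySem.Str.isIn (PySem.Str.lower (PySem.Str.strip name)) lower then some name
    else pvAGo lower rest

def extract_underwriter (text : String) (known_names : List String) : Option String :=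
  if text = "" ∨ known_names = [] then none
  else pvAGo (PySem.Str.lower text) known_names

-- ===== PORT B =====
-- the inner "for p in distinct" loop at text position i.
-- Python's lower.startswith(p, i) with 0 ≤ i < len(lower) is exactly 'p is a prefix of lower[i:]'.
def pvBInner (lower : List Char) (i : Int) : PySem.Set (List Char) → List (List Char) → PySem.Set (List Char)
  | fnd, [] => fnd
  | fnd, p :: rest =>
      if fnd.contains p = false ∧ PySem.Chars.startswith (lower.drop i.toNat) p = true then
        pvBInner lower i (fnd.add p) rest
      else pvBInner lower i fnd rest

-- the 'for i in range(len(lower))' loop building 'found'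
def pvBFound (lower : List Char) (distinct : List (List Char)) : PySem.Set (List Char) :=
  (PySem.List.pyRange 0 (lower.length : Int) 1).foldl (fun fnd i => pvBInner lower i fnd distinct) PySem.Set.empty

-- distinct = list(dict.fromkeys(p for name, p in pats))
def pvDistinct (pats : List (String × List Char)) : List (List Char) :=
  PySem.List.dedup (pats.map (fun pr => pr.2))

-- the final 'for name, p in pats' selection loop
def pvBSelect (found : PySem.Set (List Char)) : List (String × List Char) → Option String
  | [] => none
  | (name, p) :: rest => if found.contains p then some name else pvBSelect found rest

def pvPats (names : List String) : List (String × List Char) :=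
  (names.filter (fun n => n ≠ "")).map (fun n => (n, (PySem.Str.lower (PySem.Str.strip n)).toList))

def extract_underwriter_alt (text : String) (known_names : List String) : Option String :=
  if text = "" ∨ known_names = [] then none
  else
    let lower := (PySem.Str.lower text).toList
    let pats := pvPats known_names
    if pats = [] then none
    else
      let distinct := pvDistinct pats
      pvBSelect (pvBFound lower distinct) pats

-- ===== PRECONDITION & SPEC =====
def Spec_extract_underwriter (text : String) (known_names : List String) (out : Option String) : Prop := out = extract_underwriter_alt text known_names
instance (text : String) (known_names : List String) (out : Option String) : Decidable (Spec_extract_underwriter text known_names out) := by unfold Spec_extract_underwriter; infer_instance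

-- ===== CLAIM (what is proved, stated in full; the proofs are below) =====
def Claim_equal_extract_underwriter : Prop := ∀ (text : String) (known_names : List String), Dom_extract_underwriter text known_names → Spec_extract_underwriter text known_names (extract_underwriter text known_names)


-- ===== LEMMAS AND PROOFS =====

lemma pvBInner_cons_pos (lower : List Char) (i : Int) (fnd : PySem.Set (List Char))
    (p : List Char) (tl : List (List Char))
    (h1 : fnd.contains p = false) (h2 : PySem.Chars.startswith (lower.drop i.toNat) p = true) :
    pvBInner lower i fnd (p :: tl) = pvBInner lower i (fnd.add p) tl := by
  simp only [pvBInner]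
  rw [if_pos ⟨h1, h2⟩]

lemma pvBInner_cons_neg (lower : List Char) (i : Int) (fnd : PySem.Set (List Char))
    (p : List Char) (tl : List (List Char))
    (h : ¬ (fnd.contains p = false ∧ PySem.Chars.startswith (lower.drop i.toNat) p = true)) :
    pvBInner lower i fnd (p :: tl) = pvBInner lower i fnd tl := by
  simp only [pvBInner]
  rw [if_neg h]

-- membership after the inner per-position loop
lemma pvBInner_mem (lower : List Char) (i : Int) (ps : List (List Char))
    (fnd : PySem.Set (List Char)) (q : List Char) :
    q ∈ pvBInner lower i fnd ps ↔
      q ∈ fnd ∨ (q ∈ ps ∧ PySem.Chars.startswith (lower.drop i.toNat) q = true) := by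
  induction ps generalizing fnd with
  | nil => simp [pvBInner]
  | cons p tl ih =>
    by_cases hsw : PySem.Chars.startswith (lower.drop i.toNat) p = true
    · by_cases hc : fnd.contains p = false
      · rw [pvBInner_cons_pos lower i fnd p tl hc hsw, ih]
        simp only [PySem.Set.mem_add, List.mem_cons]
        constructor
        · rintro (⟨h | h⟩ | ⟨h1, h2⟩)
          · exact Or.inl h
          · exact Or.inr ⟨Or.inl h, h ▸ hsw⟩
          · exact Or.inr ⟨Or.inr h1, h2⟩
        · rintro (h | ⟨h1 | h1, h2⟩)
          · exact Or.inl (Or.inl h)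
          · exact Or.inl (Or.inr h1)
          · exact Or.inr ⟨h1, h2⟩
      · have hmem : p ∈ fnd := (PySem.Set.contains_iff fnd p).mp (by simpa using hc)
        rw [pvBInner_cons_neg lower i fnd p tl (fun hand => hc hand.1), ih]
        constructor
        · rintro (h | ⟨h1, h2⟩)
          · exact Or.inl h
          · exact Or.inr ⟨List.mem_cons_of_mem _ h1, h2⟩
        · rintro (h | ⟨h1, h2⟩)
          · exact Or.inl h
          · rcases List.mem_cons.mp h1 with h3 | h3
            · exact Or.inl (h3 ▸ hmem)
            · exact Or.inr ⟨h3, h2⟩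
    · rw [pvBInner_cons_neg lower i fnd p tl (fun hand => hsw hand.2), ih]
      constructor
      · rintro (h | ⟨h1, h2⟩)
        · exact Or.inl h
        · exact Or.inr ⟨List.mem_cons_of_mem _ h1, h2⟩
      · rintro (h | ⟨h1, h2⟩)
        · exact Or.inl h
        · rcases List.mem_cons.mp h1 with h3 | h3
          · exact absurd (h3 ▸ h2) hsw
          · exact Or.inr ⟨h3, h2⟩

-- membership after the outer loop over the positions 'is'
lemma pvBFold_mem (lower : List Char) (ps : List (List Char))
    (is : List Int) (fnd : PySem.Set (List Char)) (q : List Char) :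
    q ∈ is.foldl (fun f i => pvBInner lower i f ps) fnd ↔
      q ∈ fnd ∨ (q ∈ ps ∧ ∃ i ∈ is, PySem.Chars.startswith (lower.drop i.toNat) q = true) := by
  induction is generalizing fnd with
  | nil => simp
  | cons j js ih =>
    simp only [List.foldl_cons, ih, pvBInner_mem, List.mem_cons]
    constructor
    · rintro ((h | ⟨h1, h2⟩) | ⟨h1, i, hi, hs⟩)
      · exact Or.inl h
      · exact Or.inr ⟨h1, j, Or.inl rfl, h2⟩
      · exact Or.inr ⟨h1, i, Or.inr hi, hs⟩
    · rintro (h | ⟨h1, i, hi | hi, hs⟩)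
      · exact Or.inl (Or.inl h)
      · exact Or.inl (Or.inr ⟨h1, by cases hi; exact hs⟩)
      · exact Or.inr ⟨h1, i, hi, hs⟩

-- a pattern is collected iff it is one of the distinct patterns and occurs in the (nonempty) text
lemma pvBFound_mem (lower : List Char) (ps : List (List Char))
    (hne : lower ≠ []) (q : List Char) :
    q ∈ pvBFound lower ps ↔ q ∈ ps ∧ PySem.Chars.isIn q lower = true := by
  rw [pvBFound, pvBFold_mem]
  have hlen : 0 < lower.length := List.length_pos_iff.mpr hne
  constructor
  · rintro (h | ⟨h1, i, hi, hs⟩)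
    · simp [PySem.Set.empty] at h
    · refine ⟨h1, ?_⟩
      exact (PySem.Chars.exists_prefix_drop_iff_isIn q lower).mp
        ⟨i.toNat, (PySem.Chars.startswith_iff _ _).mp hs⟩
  · rintro ⟨h1, hin⟩
    obtain ⟨j, hj⟩ := (PySem.Chars.exists_prefix_drop_iff_isIn q lower).mpr hin
    by_cases hjl : j < lower.length
    · refine Or.inr ⟨h1, (j : Int), ?_, ?_⟩
      · rw [PySem.List.mem_pyRange_one]; omega
      · rw [PySem.Chars.startswith_iff]; simpa using hj
    · have hd : lower.drop j = [] := List.drop_eq_nil_of_le (by omega)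
      have hq : q = [] := List.prefix_nil.mp (hd ▸ hj)
      refine Or.inr ⟨h1, 0, ?_, ?_⟩
      · rw [PySem.List.mem_pyRange_one]; omega
      · rw [PySem.Chars.startswith_iff]; simp [hq]

-- the selection loop over 'pats' returns what A's loop over the names returns
lemma pvSelect_eq (lowerS : String) (found : PySem.Set (List Char)) (names : List String)
    (hf : ∀ nm p, (nm, p) ∈ pvPats names → (found.contains p = true ↔
      PySem.Chars.isIn p lowerS.toList = true)) :
    ∀ ns : List String, (∀ n ∈ ns, n ∈ names) →
      pvAGo lowerS ns = pvBSelect found (pvPats ns) := by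
  intro ns
  induction ns with
  | nil => intro _; simp [pvAGo, pvPats, pvBSelect]
  | cons n rest ih =>
    intro h
    have hn : n ∈ names := h n (List.mem_cons_self)
    have hrest := ih (fun m hm => h m (List.mem_cons_of_mem _ hm))
    by_cases he : n = ""
    · subst he
      simpa [pvAGo, pvPats] using hrest
    · have hp : pvPats (n :: rest) =
        (n, (PySem.Str.lower (PySem.Str.strip n)).toList) :: pvPats rest := by
        simp [pvPats, he]
      have hmemP : (n, (PySem.Str.lower (PySem.Str.strip n)).toList) ∈ pvPats names := by
        unfold pvPats
        exact List.mem_map.mpr ⟨n, List.mem_filter.mpr ⟨hn, by simpa using he⟩, rfl⟩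
      have hcond := hf n ((PySem.Str.lower (PySem.Str.strip n)).toList) hmemP
      rw [hp]
      simp only [pvAGo, pvBSelect, if_neg he]
      rw [PySem.Str.isIn_eq]
      by_cases hin : PySem.Chars.isIn ((PySem.Str.lower (PySem.Str.strip n)).toList) lowerS.toList = true
      · rw [if_pos hin, if_pos (hcond.mpr hin)]
      · have hc : found.contains ((PySem.Str.lower (PySem.Str.strip n)).toList) = false := by
          by_contra hcon
          exact hin (hcond.mp (by simpa using hcon))
        rw [if_neg hin,
          if_neg (by intro hcon; rw [hc] at hcon; exact Bool.false_ne_true hcon)]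
        exact hrest

-- ===== VERDICT (by name: the statement is the Claim_ definition above) =====
set_option maxHeartbeats 1600000 in
theorem extract_underwriter_spec : Claim_equal_extract_underwriter := by
  intro text known_names _
  unfold Spec_extract_underwriter extract_underwriter extract_underwriter_alt
  by_cases hdeg : text = "" ∨ known_names = []
  · rw [if_pos hdeg, if_pos hdeg]
  · rw [if_neg hdeg, if_neg hdeg]
    have htext : text ≠ "" := fun h => hdeg (Or.inl h)
    have hne : (PySem.Str.lower text).toList ≠ [] := by
      rw [PySem.Str.toList_lower]
      intro hcon
      apply htext
      have h0 : text.toList = [] := by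
        have hlen := congrArg List.length hcon
        simp only [PySem.Chars.lower, List.length_map, List.length_nil] at hlen
        exact List.length_eq_zero_iff.mp hlen
      exact String.toList_eq_nil_iff.mp h0
    have hf : ∀ nm p, (nm, p) ∈ pvPats known_names →
        ((pvBFound (PySem.Str.lower text).toList (pvDistinct (pvPats known_names))).contains p = true ↔
          PySem.Chars.isIn p (PySem.Str.lower text).toList = true) := by
      intro nm p hpr
      have hd : p ∈ pvDistinct (pvPats known_names) := by
        rw [pvDistinct, PySem.List.mem_dedup]
        exact List.mem_map.mpr ⟨(nm, p), hpr, rfl⟩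
      rw [PySem.Set.contains_iff, pvBFound_mem _ _ hne]
      exact ⟨fun hh => hh.2, fun hh => ⟨hd, hh⟩⟩
    have hsel := pvSelect_eq (PySem.Str.lower text)
      (pvBFound (PySem.Str.lower text).toList (pvDistinct (pvPats known_names))) known_names
      hf known_names (fun _ h => h)
    by_cases hp : pvPats known_names = []
    · rw [if_pos hp, hsel, hp]
      rfl
    · rw [if_neg hp]
      exact hsel
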